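-- pv_equiv track=rewrite | github.com/anhhai680/knowledge-graph-agent | src/analyzers/architecture_detector.py | _extract_characteristics
-- ===== SOURCE A (Python) =====
-- from enum import Enum
-- from typing import Dict, List, Optional, Set, Any
--
-- class ArchitecturePattern(str, Enum):
--     """Architecture pattern enumeration."""
--
--     CLEAN_ARCHITECTURE = "clean_architecture"
--     MVC = "mvc"
--     MICROSERVICES = "microservices"
--     LAYERED = "layered"
--     EVENT_DRIVEN = "event_driven"
--     HEXAGONAL = "hexagonal"
--     MODULAR_MONOLITH = "modular_monolith"
--     GENERIC = "generic"
--
-- def _extract_characteristics(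
--
--     project_structure: Dict[str, List[str]],
--     primary_pattern: ArchitecturePattern
-- ) -> Dict[str, Any]:
--     """Extract architectural characteristics."""
--     folders = project_structure.get("folders", [])
--     files = project_structure.get("files", [])
--
--     characteristics = {
--         "separation_of_concerns": len(folders) > 3,
--         "modular_structure": any("module" in folder for folder in folders),
--         "test_coverage": any("test" in folder or "test" in file for folder in folders for file in files),
--         "configuration_management": any("config" in folder for folder in folders),
--         "dependency_injection": False,  # Would need code analysis
--         "event_handling": any("event" in folder or "handler" in folder for folder in folders),
--         "api_design": any("api" in folder or "controller" in folder for folder in folders),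
--         "data_access": any("repository" in folder or "data" in folder for folder in folders),
--     }
--
--     # Pattern-specific characteristics
--     if primary_pattern == ArchitecturePattern.CLEAN_ARCHITECTURE:
--         characteristics.update({
--             "clean_architecture_compliance": True,
--             "dependency_inversion": True,
--             "testability": True
--         })
--     elif primary_pattern == ArchitecturePattern.MICROSERVICES:
--         characteristics.update({
--             "service_oriented": True,
--             "distributed_system": True,
--             "scalability_focus": True
--         })
--
--     return characteristics
-- ===== SOURCE B (Python) =====
-- def _extract_characteristics(project_structure, primary_pattern):
--     folders = project_structure.get("folders", [])
--     files = project_structure.get("files", [])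
--
--     modular = folder_test = config = event = api = data = False
--     for folder in folders:
--         modular = modular or ("module" in folder)
--         folder_test = folder_test or ("test" in folder)
--         config = config or ("config" in folder)
--         event = event or ("event" in folder or "handler" in folder)
--         api = api or ("api" in folder or "controller" in folder)
--         data = data or ("repository" in folder or "data" in folder)
--     file_test = False
--     for file in files:
--         file_test = file_test or ("test" in file)
--
--     characteristics = {
--         "separation_of_concerns": len(folders) > 3,
--         "modular_structure": modular,
--         "test_coverage": bool(folders) and (bool(files) and (folder_test or file_test)),
--         "configuration_management": config,
--         "dependency_injection": False,
--         "event_handling": event,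
--         "api_design": api,
--         "data_access": data,
--     }
--
--     extras = {
--         "clean_architecture": {
--             "clean_architecture_compliance": True,
--             "dependency_inversion": True,
--             "testability": True,
--         },
--         "microservices": {
--             "service_oriented": True,
--             "distributed_system": True,
--             "scalability_focus": True,
--         },
--     }
--     characteristics.update(extras.get(primary_pattern, {}))
--     return characteristics
-- ===== Notes on version B (the rewrite author's own statement) =====
-- stated objective: alternative
-- what changed: Replaces A's six separate any-scans and the quadratic folders-x-files nested any for test_coverage by one fused pass over folders accumulating all folder flags, one pass over files, test_coverage recombined as bool(folders) and bool(files) and (folder_test or file_test), and the pattern-specific extras taken from a lookup table instead of an if/elif chain.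
import Mathlib
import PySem

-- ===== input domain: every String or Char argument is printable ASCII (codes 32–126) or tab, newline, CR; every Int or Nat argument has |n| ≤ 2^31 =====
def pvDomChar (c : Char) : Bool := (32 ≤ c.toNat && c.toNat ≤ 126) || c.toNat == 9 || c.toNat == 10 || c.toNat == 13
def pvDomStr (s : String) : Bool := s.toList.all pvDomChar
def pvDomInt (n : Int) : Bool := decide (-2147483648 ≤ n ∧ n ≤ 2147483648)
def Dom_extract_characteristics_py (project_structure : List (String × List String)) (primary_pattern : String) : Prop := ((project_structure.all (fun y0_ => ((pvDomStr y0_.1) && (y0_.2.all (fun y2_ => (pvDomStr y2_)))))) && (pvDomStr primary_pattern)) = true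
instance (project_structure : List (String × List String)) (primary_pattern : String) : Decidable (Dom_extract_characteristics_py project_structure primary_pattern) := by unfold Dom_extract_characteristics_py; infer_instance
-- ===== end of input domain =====

-- B (alternative): one fused pass over folders and one over files with a lookup table for pattern extras, instead of A's six any-scans and nested folders-x-files any; same results.


-- ===== PORT A =====
-- dict.get(k, []) : first pair whose key equals k, else the default []
def pvGetList (ps : List (String × List String)) (k : String) : List String :=
  match ps.find? (fun p => p.1 == k) with
  | some p => p.2
  | none => []

-- dict.update: overwrite an existing key in place, append a new key at the end
def pvDictUpdate (d u : List (String × Bool)) : List (String × Bool) :=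
  u.foldl (fun acc kv =>
    if acc.any (fun p => p.1 == kv.1) then
      acc.map (fun p => if p.1 == kv.1 then (p.1, kv.2) else p)
    else acc ++ [kv]) d

def extract_characteristics_py (project_structure : List (String × List String)) (primary_pattern : String) : List (String × Bool) :=
  let folders := pvGetList project_structure "folders"
  let files := pvGetList project_structure "files"
  let characteristics : List (String × Bool) := [
    ("separation_of_concerns", decide (folders.length > 3)),
    ("modular_structure", folders.any (fun folder => PySem.Str.isIn "module" folder)),
    ("test_coverage", folders.any (fun folder => files.any (fun file => PySem.Str.isIn "test" folder || PySem.Str.isIn "test" file))),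
    ("configuration_management", folders.any (fun folder => PySem.Str.isIn "config" folder)),
    ("dependency_injection", false),
    ("event_handling", folders.any (fun folder => PySem.Str.isIn "event" folder || PySem.Str.isIn "handler" folder)),
    ("api_design", folders.any (fun folder => PySem.Str.isIn "api" folder || PySem.Str.isIn "controller" folder)),
    ("data_access", folders.any (fun folder => PySem.Str.isIn "repository" folder || PySem.Str.isIn "data" folder))]
  if primary_pattern == "clean_architecture" then
    pvDictUpdate characteristics [("clean_architecture_compliance", true), ("dependency_inversion", true), ("testability", true)]
  else if primary_pattern == "microservices" then
    pvDictUpdate characteristics [("service_oriented", true), ("distributed_system", true), ("scalability_focus", true)]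
  else characteristics

-- ===== PORT B =====
-- one fused pass over folders: (modular, folder_test, config, event, api, data)
def altFolderFlags (folders : List String) : Bool × Bool × Bool × Bool × Bool × Bool :=
  folders.foldl (fun s folder =>
    (s.1 || PySem.Str.isIn "module" folder,
     s.2.1 || PySem.Str.isIn "test" folder,
     s.2.2.1 || PySem.Str.isIn "config" folder,
     s.2.2.2.1 || (PySem.Str.isIn "event" folder || PySem.Str.isIn "handler" folder),
     s.2.2.2.2.1 || (PySem.Str.isIn "api" folder || PySem.Str.isIn "controller" folder),
     s.2.2.2.2.2 || (PySem.Str.isIn "repository" folder || PySem.Str.isIn "data" folder)))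
    (false, false, false, false, false, false)

def extract_characteristics_py_alt (project_structure : List (String × List String)) (primary_pattern : String) : List (String × Bool) :=
  let folders := pvGetList project_structure "folders"
  let files := pvGetList project_structure "files"
  let flags := altFolderFlags folders
  let fileTest := files.foldl (fun t file => t || PySem.Str.isIn "test" file) false
  let characteristics : List (String × Bool) := [
    ("separation_of_concerns", decide (folders.length > 3)),
    ("modular_structure", flags.1),
    ("test_coverage", !folders.isEmpty && (!files.isEmpty && (flags.2.1 || fileTest))),
    ("configuration_management", flags.2.2.1),
    ("dependency_injection", false),
    ("event_handling", flags.2.2.2.1),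
    ("api_design", flags.2.2.2.2.1),
    ("data_access", flags.2.2.2.2.2)]
  let extras : List (String × List (String × Bool)) := [
    ("clean_architecture", [("clean_architecture_compliance", true), ("dependency_inversion", true), ("testability", true)]),
    ("microservices", [("service_oriented", true), ("distributed_system", true), ("scalability_focus", true)])]
  pvDictUpdate characteristics
    (match extras.find? (fun p => primary_pattern == p.1) with
     | some p => p.2
     | none => [])

-- ===== PRECONDITION & SPEC =====
def Spec_extract_characteristics_py (project_structure : List (String × List String)) (primary_pattern : String) (out : List (String × Bool)) : Prop := out = extract_characteristics_py_alt project_structure primary_pattern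
instance (project_structure : List (String × List String)) (primary_pattern : String) (out : List (String × Bool)) : Decidable (Spec_extract_characteristics_py project_structure primary_pattern out) := by unfold Spec_extract_characteristics_py; infer_instance

-- ===== CLAIM (what is proved, stated in full; the proofs are below) =====
def Claim_equal_extract_characteristics_py : Prop := ∀ (project_structure : List (String × List String)) (primary_pattern : String), Dom_extract_characteristics_py project_structure primary_pattern → Spec_extract_characteristics_py project_structure primary_pattern (extract_characteristics_py project_structure primary_pattern)

-- ===== LEMMAS AND PROOFS =====

-- the fused folder loop computes the six any-scans
theorem altFolderFlags_eq (P1 P2 P3 P4 P5 P6 : String → Bool) (l : List String)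
    (a b c d e f : Bool) :
    l.foldl (fun s x => (s.1 || P1 x, s.2.1 || P2 x, s.2.2.1 || P3 x,
      s.2.2.2.1 || P4 x, s.2.2.2.2.1 || P5 x, s.2.2.2.2.2 || P6 x)) (a, b, c, d, e, f) =
    (a || l.any P1, b || l.any P2, c || l.any P3, d || l.any P4, e || l.any P5, f || l.any P6) := by
  induction l generalizing a b c d e f with
  | nil => simp
  | cons h t ih => simp [List.any_cons, ih, Bool.or_assoc]

theorem foldl_or_eq_any (p : String → Bool) (l : List String) (b : Bool) :
    l.foldl (fun t x => t || p x) b = (b || l.any p) := by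
  induction l generalizing b with
  | nil => simp
  | cons h t ih => rw [List.foldl_cons, ih]; simp [List.any_cons, Bool.or_assoc]

-- the nested any over the product of two lists, as two independent scans
theorem nested_any_eq (p q : String → Bool) (fo fi : List String) :
    fo.any (fun x => fi.any (fun y => p x || q y)) =
    (!fo.isEmpty && (!fi.isEmpty && (fo.any p || fi.any q))) := by
  rw [Bool.eq_iff_iff]
  simp only [List.any_eq_true, Bool.and_eq_true, Bool.not_eq_eq_eq_not, Bool.not_true,
    List.isEmpty_eq_false_iff, Bool.or_eq_true]
  constructor
  · rintro ⟨x, hx, y, hy, h⟩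
    exact ⟨List.ne_nil_of_mem hx, List.ne_nil_of_mem hy,
      h.imp (fun h => ⟨x, hx, h⟩) (fun h => ⟨y, hy, h⟩)⟩
  · rintro ⟨hfo, hfi, h⟩
    obtain ⟨x0, hx0⟩ := List.exists_mem_of_ne_nil fo hfo
    obtain ⟨y0, hy0⟩ := List.exists_mem_of_ne_nil fi hfi
    rcases h with ⟨x, hx, hp⟩ | ⟨y, hy, hq⟩
    · exact ⟨x, hx, y0, hy0, Or.inl hp⟩
    · exact ⟨x0, hx0, y, hy, Or.inr hq⟩

-- ===== VERDICT (by name: the statement is the Claim_ definition above) =====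
theorem extract_characteristics_py_spec : Claim_equal_extract_characteristics_py := by
  intro ps pp _
  unfold Spec_extract_characteristics_py extract_characteristics_py extract_characteristics_py_alt
  simp only [altFolderFlags, altFolderFlags_eq, foldl_or_eq_any, nested_any_eq, Bool.false_or]
  by_cases h1 : pp == "clean_architecture"
  · simp only [List.find?, h1]
    rfl
  · by_cases h2 : pp == "microservices" <;> simp only [List.find?, h1, h2] <;> rfl
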